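-- pv_equiv track=rewrite | github.com/hyeonhye126/codingtest_hyeonhye | 프로그래머스/1/42840. 모의고사/모의고사.py | solution
-- ===== SOURCE A (Python) =====
-- def solution(answers):
--     stu_1 = [1,2,3,4,5]
--     stu_2 = [2,1,2,3,2,4,2,5]
--     stu_3 = [3,3,1,1,2,2,4,4,5,5]
--     scores = {1: 0, 2: 0, 3: 0}
--
--     for i in range(len(answers)):
--         if answers[i] == stu_1[i % len(stu_1)]:
--             scores[1] += 1
--         if answers[i] == stu_2[i % len(stu_2)]:
--             scores[2] += 1
--         if answers[i] == stu_3[i % len(stu_3)]: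
--             scores[3] +=1
--
--     max_score = max(scores.values())
--     top_score = [k for k, v in scores.items() if v == max_score]
--     answer = sorted(top_score)
--
--     return answer
-- ===== SOURCE B (Python) =====
-- def solution(answers):
--     patterns = [[1, 2, 3, 4, 5],
--                 [2, 1, 2, 3, 2, 4, 2, 5],
--                 [3, 3, 1, 1, 2, 2, 4, 4, 5, 5]]
--     # One histogram pass: tally how often each (position mod 40, answer) pair occurs.
--     # 40 = lcm(5, 8, 10) is the joint period of the three patterns, so a pattern's
--     # score is a fixed sum of 40 table lookups, independent of the answers themselves.
--     tally = {}
--     for i, a in enumerate(answers):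
--         key = (i % 40, a)
--         tally[key] = tally.get(key, 0) + 1
--     scores = [sum(tally.get((r, p[r % len(p)]), 0) for r in range(40))
--               for p in patterns]
--     best = max(scores)
--     return [idx + 1 for idx, s in enumerate(scores) if s == best]
-- ===== Notes on version B (the rewrite author's own statement) =====
-- stated objective: alternative
-- what changed: Instead of comparing every answer against the three cyclic patterns (A's interleaved loop with three conditionals), B builds one histogram of (index mod 40, answer) pairs -- 40 being the joint period of the patterns -- and reads each pattern's score off the histogram as a fixed sum of 40 lookups; max-filter over the resulting score list then yields the ascending student numbers without sorting.
import Mathlib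
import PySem

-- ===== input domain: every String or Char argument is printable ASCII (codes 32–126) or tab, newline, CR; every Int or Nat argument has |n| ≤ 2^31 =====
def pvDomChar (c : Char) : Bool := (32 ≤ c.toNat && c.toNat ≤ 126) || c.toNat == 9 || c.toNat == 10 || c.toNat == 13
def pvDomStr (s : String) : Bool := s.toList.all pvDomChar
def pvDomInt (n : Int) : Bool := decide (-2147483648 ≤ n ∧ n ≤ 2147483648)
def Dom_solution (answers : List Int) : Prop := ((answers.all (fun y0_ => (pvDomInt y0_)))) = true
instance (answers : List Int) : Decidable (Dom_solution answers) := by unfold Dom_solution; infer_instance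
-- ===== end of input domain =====

-- B replaces A's per-answer comparisons against the three cyclic patterns by a single
-- histogram of (index mod 40, answer) pairs (40 = joint period of the patterns), from
-- which each pattern's score is a fixed sum of 40 lookups (alternative decomposition).

-- ===== PORT A =====
-- Literal port of A: one loop over range(len(answers)) updating a dict {1:0,2:0,3:0},
-- then max over values, filter items, sort the keys. pyGetD is exact here: every index
-- used is in range (i < len(answers); i % len(stu) < len(stu)).
def solution (answers : List Int) : List Int :=
  let stu1 : List Int := [1, 2, 3, 4, 5]
  let stu2 : List Int := [2, 1, 2, 3, 2, 4, 2, 5]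
  let stu3 : List Int := [3, 3, 1, 1, 2, 2, 4, 4, 5, 5]
  let scores0 : PySem.Dict Int Int := PySem.Dict.ofList [(1, 0), (2, 0), (3, 0)]
  let scores := (PySem.List.pyRange 0 (answers.length : Int) 1).foldl (fun d i =>
      let d := if PySem.List.pyGetD answers i 0 =
                   PySem.List.pyGetD stu1 (PySem.Int.mod i (stu1.length : Int)) 0
               then d.insert 1 (d.getD 1 0 + 1) else d
      let d := if PySem.List.pyGetD answers i 0 =
                   PySem.List.pyGetD stu2 (PySem.Int.mod i (stu2.length : Int)) 0
               then d.insert 2 (d.getD 2 0 + 1) else d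
      if PySem.List.pyGetD answers i 0 =
           PySem.List.pyGetD stu3 (PySem.Int.mod i (stu3.length : Int)) 0
      then d.insert 3 (d.getD 3 0 + 1) else d) scores0
  let maxScore := (PySem.List.max? scores.values (fun v => v)).getD 0   -- values nonempty: max never raises
  let topScore := (scores.items.filter (fun kv => kv.2 = maxScore)).map (fun kv => kv.1)
  PySem.List.sorted topScore (fun k => k)

-- ===== PORT B =====
-- tally = {}; for i, a in enumerate(answers): key = (i % 40, a); tally[key] = tally.get(key, 0) + 1
def tallyOf (answers : List Int) : PySem.Dict (Int × Int) Int :=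
  (PySem.List.enumerate answers 0).foldl
    (fun d ia =>
      let key : Int × Int := (PySem.Int.mod ia.1 40, ia.2)
      d.insert key (d.getD key 0 + 1))
    PySem.Dict.empty

-- sum(tally.get((r, p[r % len(p)]), 0) for r in range(40))
def scoreFrom (tally : PySem.Dict (Int × Int) Int) (p : List Int) : Int :=
  (PySem.List.pyRange 0 40 1).foldl
    (fun s r => s + tally.getD (r, PySem.List.pyGetD p (PySem.Int.mod r (p.length : Int)) 0) 0) 0

def solution_alt (answers : List Int) : List Int :=
  let patterns : List (List Int) :=
    [[1, 2, 3, 4, 5], [2, 1, 2, 3, 2, 4, 2, 5], [3, 3, 1, 1, 2, 2, 4, 4, 5, 5]]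
  let tally := tallyOf answers
  let scores := patterns.map (fun p => scoreFrom tally p)
  let best := (PySem.List.max? scores (fun v => v)).getD 0              -- scores has 3 entries: max never raises
  ((PySem.List.enumerate scores 0).filter (fun is => is.2 = best)).map (fun is => is.1 + 1)

-- ===== PRECONDITION & SPEC =====
def Spec_solution (answers : List Int) (out : List Int) : Prop := out = solution_alt answers
instance (answers : List Int) (out : List Int) : Decidable (Spec_solution answers out) := by unfold Spec_solution; infer_instance

-- ===== CLAIM (what is proved, stated in full; the proofs are below) =====
def Claim_equal_solution : Prop := ∀ (answers : List Int), Dom_solution answers → Spec_solution answers (solution answers)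

-- ===== LEMMAS AND PROOFS =====

-- count of matches of pattern p against xs, xs starting at absolute index s
def cnt (p : List Int) : Int → List Int → Int
  | _, [] => 0
  | s, x :: xs =>
      (if x = PySem.List.pyGetD p (PySem.Int.mod s (p.length : Int)) 0 then 1 else 0)
        + cnt p (s + 1) xs

lemma enumerate_append_singleton (xs : List Int) (y : Int) : ∀ (s : Int),
    PySem.List.enumerate (xs ++ [y]) s
      = PySem.List.enumerate xs s ++ [(s + (xs.length : Int), y)] := by
  induction xs with
  | nil => intro s; simp [PySem.List.enumerate_cons, PySem.List.enumerate]
  | cons x xs ih =>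
      intro s
      simp only [List.cons_append, PySem.List.enumerate_cons, ih, List.length_cons]
      push_cast
      ring_nf

-- A's index loop over range(len(xs)) with xs[i] is the fold over enumerate(xs)
lemma range_fold_eq_enum_fold {σ : Type} (f : σ → Int × Int → σ) (xs : List Int) (init : σ) :
    (PySem.List.pyRange 0 (xs.length : Int) 1).foldl
        (fun d i => f d (i, PySem.List.pyGetD xs i 0)) init
      = (PySem.List.enumerate xs 0).foldl f init := by
  induction xs using List.reverseRecOn generalizing init with
  | nil => simp [PySem.List.pyRange_one_eq_nil, PySem.List.enumerate]
  | append_singleton ys y ih =>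
      have hlen : ((ys ++ [y]).length : Int) = (ys.length : Int) + 1 := by
        simp
      rw [hlen, PySem.List.pyRange_one_succ_right (by positivity), List.foldl_append,
          enumerate_append_singleton, List.foldl_append]
      have hpre : (PySem.List.pyRange 0 (ys.length : Int) 1).foldl
          (fun d i => f d (i, PySem.List.pyGetD (ys ++ [y]) i 0)) init
          = (PySem.List.pyRange 0 (ys.length : Int) 1).foldl
          (fun d i => f d (i, PySem.List.pyGetD ys i 0)) init := by
        apply PySem.List.foldl_congr_mem
        intro acc i hi
        have hi' := (PySem.List.mem_pyRange_one).1 hi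
        have h0 : 0 ≤ i := hi'.1
        have h1 : i < (ys.length : Int) := hi'.2
        rw [PySem.List.pyGetD_eq_getElem (ys ++ [y]) 0 h0 (by simp; omega),
            PySem.List.pyGetD_eq_getElem ys 0 h0 (by omega)]
        congr 1
        rw [List.getElem_append_left]
      have hlast : PySem.List.pyGetD (ys ++ [y]) ((ys.length : Int)) 0 = y := by
        rw [PySem.List.pyGetD_eq_getElem (ys ++ [y]) 0 (by positivity) (by simp)]
        simp
      rw [hpre, ih]
      simp [hlast]

def stu1L : List Int := [1, 2, 3, 4, 5]
def stu2L : List Int := [2, 1, 2, 3, 2, 4, 2, 5]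
def stu3L : List Int := [3, 3, 1, 1, 2, 2, 4, 4, 5, 5]

-- A's loop body on the pair (index, element)
def stepA (d : PySem.Dict Int Int) (ia : Int × Int) : PySem.Dict Int Int :=
  let d := if ia.2 = PySem.List.pyGetD stu1L (PySem.Int.mod ia.1 (stu1L.length : Int)) 0
           then d.insert 1 (d.getD 1 0 + 1) else d
  let d := if ia.2 = PySem.List.pyGetD stu2L (PySem.Int.mod ia.1 (stu2L.length : Int)) 0
           then d.insert 2 (d.getD 2 0 + 1) else d
  if ia.2 = PySem.List.pyGetD stu3L (PySem.Int.mod ia.1 (stu3L.length : Int)) 0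
  then d.insert 3 (d.getD 3 0 + 1) else d

lemma dict_fold (xs : List Int) : ∀ (s a b c : Int),
    (PySem.List.enumerate xs s).foldl stepA (PySem.Dict.mk [(1, a), (2, b), (3, c)])
      = PySem.Dict.mk [(1, a + cnt stu1L s xs), (2, b + cnt stu2L s xs), (3, c + cnt stu3L s xs)] := by
  induction xs with
  | nil => intro s a b c; simp [PySem.List.enumerate, cnt]
  | cons x xs ih =>
      intro s a b c
      rw [PySem.List.enumerate_cons]
      simp only [List.foldl_cons]
      have hstep : stepA (PySem.Dict.mk [(1, a), (2, b), (3, c)]) (s, x)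
          = PySem.Dict.mk
              [(1, a + (if x = PySem.List.pyGetD stu1L (PySem.Int.mod s (stu1L.length : Int)) 0 then 1 else 0)),
               (2, b + (if x = PySem.List.pyGetD stu2L (PySem.Int.mod s (stu2L.length : Int)) 0 then 1 else 0)),
               (3, c + (if x = PySem.List.pyGetD stu3L (PySem.Int.mod s (stu3L.length : Int)) 0 then 1 else 0))] := by
        unfold stepA
        split_ifs <;> simp [PySem.Dict.insert, PySem.Dict.getD, PySem.Dict.get?, PySem.Dict.contains]
      rw [hstep, ih]
      simp only [cnt]
      ring_nf

-- ---- B side: the histogram scores are the match counts ----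

-- the key list the histogram is built from
def keysOf (answers : List Int) : List (Int × Int) :=
  (PySem.List.enumerate answers 0).map (fun ia => (PySem.Int.mod ia.1 40, ia.2))

lemma tallyOf_getD (answers : List Int) (k : Int × Int) :
    (tallyOf answers).getD k 0 = ((keysOf answers).count k : Int) := by
  have h : tallyOf answers
      = (keysOf answers).foldl (fun d k => d.insert k (d.getD k 0 + 1)) PySem.Dict.empty := by
    unfold tallyOf keysOf
    rw [List.foldl_map]
  rw [h, PySem.Dict.getD_foldl_insert_add_one]
  simp [PySem.Dict.getD_empty]

-- Σ_{r ∈ rs} [e = (r, v r)] collapses to a single membership test when rs has no duplicates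
lemma sum_ite_eq_pair (v : Int → Int) (e : Int × Int) :
    ∀ (rs : List Int), rs.Nodup →
      (rs.map (fun r => if e = (r, v r) then (1 : Int) else 0)).sum
        = if e.1 ∈ rs ∧ e.2 = v e.1 then 1 else 0 := by
  intro rs
  induction rs with
  | nil => intro _; simp
  | cons r rs ih =>
      intro hnd
      rw [List.nodup_cons] at hnd
      simp only [List.map_cons, List.sum_cons, ih hnd.2]
      by_cases he : e = (r, v r)
      · subst he
        simp [hnd.1]
      · have h1 : ¬ (e.1 = r ∧ e.2 = v e.1) := by
          rintro ⟨h, h'⟩; exact he (Prod.ext h (by rw [h'] at *; rw [h]))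
        by_cases h2 : e.1 ∈ rs ∧ e.2 = v e.1
        · simp [he, h2, List.mem_cons]
        · have : ¬ ((e.1 = r ∨ e.1 ∈ rs) ∧ e.2 = v e.1) := by tauto
          simp only [he, if_false, if_neg h2, List.mem_cons]
          rw [if_neg this]
          simp
      
-- a nodup sum of counts is a countP
lemma sum_count_eq_countP (v : Int → Int) (L : List (Int × Int)) (rs : List Int) (hnd : rs.Nodup) :
    (rs.map (fun r => (L.count (r, v r) : Int))).sum
      = (L.countP (fun e => decide (e.1 ∈ rs ∧ e.2 = v e.1)) : Int) := by
  induction L with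
  | nil => simp
  | cons e L ih =>
      have hc : ∀ r : Int, ((e :: L).count (r, v r) : Int)
          = (L.count (r, v r) : Int) + (if e = (r, v r) then 1 else 0) := by
        intro r
        rw [List.count_cons]
        push_cast
        congr 1
        by_cases h : e = (r, v r) <;> simp [h]
      simp only [hc]
      rw [PySem.List.sum_map_add_int, ih, sum_ite_eq_pair v e rs hnd, List.countP_cons]
      by_cases h : e.1 ∈ rs ∧ e.2 = v e.1 <;> simp [h]

-- countP of the keyed enumeration is the match count, provided len p divides 40
lemma countP_keys_eq_cnt (p : List Int) (hlen : 0 < p.length) (hdvd : (p.length : Int) ∣ 40)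
    (xs : List Int) : ∀ s : Int,
    ((PySem.List.enumerate xs s).countP
        (fun ia => decide ((PySem.Int.mod ia.1 40) ∈ PySem.List.pyRange 0 40 1
          ∧ ia.2 = PySem.List.pyGetD p (PySem.Int.mod (PySem.Int.mod ia.1 40) (p.length : Int)) 0)) : Int)
      = cnt p s xs := by
  induction xs with
  | nil => intro s; simp [PySem.List.enumerate, cnt]
  | cons x xs ih =>
      intro s
      have hlp : (0 : Int) < (p.length : Int) := by exact_mod_cast hlen
      have hmem : PySem.Int.mod s 40 ∈ PySem.List.pyRange 0 40 1 := by
        rw [PySem.List.mem_pyRange_one]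
        exact ⟨PySem.Int.mod_nonneg s (by norm_num), PySem.Int.mod_lt s (by norm_num)⟩
      have hmm : PySem.Int.mod (PySem.Int.mod s 40) (p.length : Int)
          = PySem.Int.mod s (p.length : Int) := by
        rw [PySem.Int.mod_eq_emod_of_pos (show (0:Int) < 40 by norm_num),
            PySem.Int.mod_eq_emod_of_pos hlp, PySem.Int.mod_eq_emod_of_pos hlp]
        exact Int.emod_emod_of_dvd s hdvd
      rw [PySem.List.enumerate_cons, List.countP_cons]
      push_cast
      rw [ih (s + 1)]
      simp only [cnt, hmm, hmem, true_and]
      by_cases h : x = PySem.List.pyGetD p (PySem.Int.mod s (p.length : Int)) 0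
      · simp [h]
        ring
      · simp [h]

lemma scoreFrom_eq_cnt (p : List Int) (hlen : 0 < p.length) (hdvd : (p.length : Int) ∣ 40)
    (answers : List Int) : scoreFrom (tallyOf answers) p = cnt p 0 answers := by
  have hN : (keysOf answers).countP
        (fun e => decide (e.1 ∈ PySem.List.pyRange 0 40 1
          ∧ e.2 = PySem.List.pyGetD p (PySem.Int.mod e.1 (p.length : Int)) 0))
      = (PySem.List.enumerate answers 0).countP
        (fun ia => decide ((PySem.Int.mod ia.1 40) ∈ PySem.List.pyRange 0 40 1
          ∧ ia.2 = PySem.List.pyGetD p (PySem.Int.mod (PySem.Int.mod ia.1 40) (p.length : Int)) 0)) := by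
    unfold keysOf
    rw [List.countP_map]
    rfl
  have h1 := sum_count_eq_countP (fun t => PySem.List.pyGetD p (PySem.Int.mod t (p.length : Int)) 0)
      (keysOf answers) (PySem.List.pyRange 0 40 1) (PySem.List.nodup_pyRange_one 0 40)
  unfold scoreFrom
  rw [PySem.List.foldl_add, zero_add]
  simp only [tallyOf_getD]
  refine h1.trans ?_
  rw [hN]
  exact countP_keys_eq_cnt p hlen hdvd answers 0

-- tail computations of the two ports, as functions of the loop results
def finishA (scores : PySem.Dict Int Int) : List Int :=
  PySem.List.sorted
    ((scores.items.filter
        (fun kv => kv.2 = (PySem.List.max? scores.values (fun v => v)).getD 0)).map (fun kv => kv.1))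
    (fun k => k)

def finishB (scores : List Int) : List Int :=
  ((PySem.List.enumerate scores 0).filter
      (fun is => is.2 = (PySem.List.max? scores (fun v => v)).getD 0)).map (fun is => is.1 + 1)

-- the endgame on explicit 3-element score lists
lemma final_lists (s1 s2 s3 m : Int) :
    PySem.List.sorted
        ((([(1, s1), (2, s2), (3, s3)] : List (Int × Int)).filter (fun kv => kv.2 = m)).map (fun kv => kv.1))
        (fun k => k)
      = ((PySem.List.enumerate [s1, s2, s3] 0).filter (fun is => is.2 = m)).map (fun is => is.1 + 1) := by
  by_cases h1 : s1 = m <;> by_cases h2 : s2 = m <;> by_cases h3 : s3 = m <;>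
    simp [h1, h2, h3, PySem.List.enumerate, List.filter] <;> decide

lemma finish_eq (s1 s2 s3 : Int) :
    finishA (PySem.Dict.mk [(1, s1), (2, s2), (3, s3)]) = finishB [s1, s2, s3] := by
  unfold finishA finishB
  have hv : (PySem.Dict.mk [((1 : Int), s1), (2, s2), (3, s3)]).values = [s1, s2, s3] := rfl
  rw [hv]
  exact final_lists s1 s2 s3 _

-- ===== VERDICT (by name: the statement is the Claim_ definition above) =====
theorem solution_spec : Claim_equal_solution := by
  intro answers _
  show solution answers = solution_alt answers
  have e1 : solution answers
      = finishA ((PySem.List.pyRange 0 ((answers.length : Int)) 1).foldl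
          (fun d i => stepA d (i, PySem.List.pyGetD answers i 0))
          (PySem.Dict.ofList [(1, 0), (2, 0), (3, 0)])) := rfl
  have e2 : solution_alt answers
      = finishB [scoreFrom (tallyOf answers) stu1L, scoreFrom (tallyOf answers) stu2L,
                 scoreFrom (tallyOf answers) stu3L] := rfl
  have e3 : (PySem.Dict.ofList [((1 : Int), (0 : Int)), (2, 0), (3, 0)])
      = PySem.Dict.mk [(1, 0), (2, 0), (3, 0)] := rfl
  rw [e1, e2, e3, range_fold_eq_enum_fold, dict_fold]
  rw [scoreFrom_eq_cnt stu1L (by decide) (by decide) answers,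
      scoreFrom_eq_cnt stu2L (by decide) (by decide) answers,
      scoreFrom_eq_cnt stu3L (by decide) (by decide) answers]
  simp only [zero_add]
  exact finish_eq _ _ _
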